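-- pv_equiv track=rewrite | github.com/adhirajkorde/Dream-Decoder-AI-Based-Sleep-Pattern-Dream-Emotion-Analyzer | backend/services/keyword_extractor.py | categorize_dream_theme
-- ===== SOURCE A (Python) =====
-- def categorize_dream_theme(keywords):
--     """
--     Categorize the dream based on detected keywords.
--
--     Args:
--         keywords: List of extracted keywords
--
--     Returns:
--         list of dream theme categories
--     """
--     categories = []
--     keywords_set = set(k.lower() for k in keywords)
--
--     theme_mapping = {
--         'anxiety': ['falling', 'chased', 'chasing', 'running', 'trapped', 'lost', 'late', 'exam', 'test'],
--         'freedom': ['flying', 'floating', 'free', 'sky', 'soaring'],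
--         'vulnerability': ['naked', 'exposed', 'teeth', 'losing'],
--         'transformation': ['death', 'dying', 'born', 'baby', 'change'],
--         'exploration': ['house', 'room', 'door', 'stairs', 'searching', 'found'],
--         'travel': ['car', 'driving', 'road', 'journey', 'airplane'],
--         'relationships': ['family', 'friend', 'mother', 'father', 'love', 'stranger'],
--         'nature': ['water', 'ocean', 'drowning', 'animal', 'forest', 'mountain'],
--         'conflict': ['monster', 'fight', 'war', 'weapon', 'attack'],
--         'supernatural': ['ghost', 'demon', 'magic', 'flying', 'powers']
--     }
--
--     for category, theme_keywords in theme_mapping.items():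
--         if any(kw in keywords_set for kw in theme_keywords):
--             categories.append(category)
--
--     return categories if categories else ['general']
-- ===== SOURCE B (Python) =====
-- # Bitmask re-implementation: each theme keyword carries a precomputed category
-- # bitmask; one pass ORs the masks of the (lowercased) input keywords together,
-- # then the category list is read off the bits in declaration order.
-- _KEYWORD_BITS = {
--     'falling': 1, 'chased': 1, 'chasing': 1, 'running': 1, 'trapped': 1,
--     'lost': 1, 'late': 1, 'exam': 1, 'test': 1,
--     'flying': 514, 'floating': 2, 'free': 2, 'sky': 2, 'soaring': 2,
--     'naked': 4, 'exposed': 4, 'teeth': 4, 'losing': 4,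
--     'death': 8, 'dying': 8, 'born': 8, 'baby': 8, 'change': 8,
--     'house': 16, 'room': 16, 'door': 16, 'stairs': 16, 'searching': 16, 'found': 16,
--     'car': 32, 'driving': 32, 'road': 32, 'journey': 32, 'airplane': 32,
--     'family': 64, 'friend': 64, 'mother': 64, 'father': 64, 'love': 64, 'stranger': 64,
--     'water': 128, 'ocean': 128, 'drowning': 128, 'animal': 128, 'forest': 128, 'mountain': 128,
--     'monster': 256, 'fight': 256, 'war': 256, 'weapon': 256, 'attack': 256,
--     'ghost': 512, 'demon': 512, 'magic': 512, 'powers': 512,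
-- }
--
-- _CATEGORY_MASKS = [
--     ('anxiety', 1), ('freedom', 2), ('vulnerability', 4), ('transformation', 8),
--     ('exploration', 16), ('travel', 32), ('relationships', 64), ('nature', 128),
--     ('conflict', 256), ('supernatural', 512),
-- ]
--
--
-- def categorize_dream_theme(keywords):
--     """Categorize the dream keywords into theme categories via bitmasks."""
--     mask = 0
--     for k in keywords:
--         mask |= _KEYWORD_BITS.get(k.lower(), 0)
--     result = [c for c, bit in _CATEGORY_MASKS if mask & bit]
--     return result if result else ['general']
-- ===== Notes on version B (the rewrite author's own statement) =====
-- stated objective: alternative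
-- what changed: Instead of scanning every category's keyword list against a set of the lowered inputs, B precomputes a per-keyword category bitmask table, ORs the masks of the lowered input keywords together in one pass, and reads the categories off the bits in declaration order.
import Mathlib
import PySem

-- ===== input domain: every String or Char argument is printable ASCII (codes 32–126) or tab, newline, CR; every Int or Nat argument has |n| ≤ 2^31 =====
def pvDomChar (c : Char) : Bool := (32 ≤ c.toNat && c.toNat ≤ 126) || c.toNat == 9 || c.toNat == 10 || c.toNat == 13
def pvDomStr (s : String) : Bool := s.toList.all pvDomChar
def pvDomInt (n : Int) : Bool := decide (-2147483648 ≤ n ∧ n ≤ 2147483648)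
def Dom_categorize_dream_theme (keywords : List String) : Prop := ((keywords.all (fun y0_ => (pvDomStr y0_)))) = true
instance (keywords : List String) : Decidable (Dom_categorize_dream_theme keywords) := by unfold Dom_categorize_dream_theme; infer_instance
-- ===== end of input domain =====

-- B replaces A's per-category scan of the keyword set by precomputed per-keyword
-- category bitmasks OR-ed together in one pass (objective: alternative structure, same cost).

-- ===== PORT A =====
-- A's theme_mapping dict literal
def pvThemeItems : List (String × List String) :=
  [("anxiety", ["falling", "chased", "chasing", "running", "trapped", "lost", "late", "exam", "test"]),
   ("freedom", ["flying", "floating", "free", "sky", "soaring"]),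
   ("vulnerability", ["naked", "exposed", "teeth", "losing"]),
   ("transformation", ["death", "dying", "born", "baby", "change"]),
   ("exploration", ["house", "room", "door", "stairs", "searching", "found"]),
   ("travel", ["car", "driving", "road", "journey", "airplane"]),
   ("relationships", ["family", "friend", "mother", "father", "love", "stranger"]),
   ("nature", ["water", "ocean", "drowning", "animal", "forest", "mountain"]),
   ("conflict", ["monster", "fight", "war", "weapon", "attack"]),
   ("supernatural", ["ghost", "demon", "magic", "flying", "powers"])]

def categorize_dream_theme (keywords : List String) : List String :=
  let keywords_set : PySem.Set String := PySem.Set.ofList (keywords.map PySem.Str.lower)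
  let theme_mapping : PySem.Dict String (List String) := PySem.Dict.ofList pvThemeItems
  let categories : List String :=
    theme_mapping.items.foldl
      (fun acc p =>
        if p.2.any (fun kw => PySem.Set.contains keywords_set kw) then acc ++ [p.1] else acc) []
  if categories = [] then ["general"] else categories

-- ===== PORT B =====
-- Source B's _KEYWORD_BITS dict literal (all values are nonnegative Python ints, ported as Nat)
def pvKeywordBits : PySem.Dict String Nat :=
  PySem.Dict.ofList
   [("falling", 1), ("chased", 1), ("chasing", 1), ("running", 1), ("trapped", 1),
    ("lost", 1), ("late", 1), ("exam", 1), ("test", 1),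
    ("flying", 514), ("floating", 2), ("free", 2), ("sky", 2), ("soaring", 2),
    ("naked", 4), ("exposed", 4), ("teeth", 4), ("losing", 4),
    ("death", 8), ("dying", 8), ("born", 8), ("baby", 8), ("change", 8),
    ("house", 16), ("room", 16), ("door", 16), ("stairs", 16), ("searching", 16), ("found", 16),
    ("car", 32), ("driving", 32), ("road", 32), ("journey", 32), ("airplane", 32),
    ("family", 64), ("friend", 64), ("mother", 64), ("father", 64), ("love", 64), ("stranger", 64),
    ("water", 128), ("ocean", 128), ("drowning", 128), ("animal", 128), ("forest", 128), ("mountain", 128),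
    ("monster", 256), ("fight", 256), ("war", 256), ("weapon", 256), ("attack", 256),
    ("ghost", 512), ("demon", 512), ("magic", 512), ("powers", 512)]

-- Source B's _CATEGORY_MASKS list literal
def pvCategoryMasks : List (String × Nat) :=
  [("anxiety", 1), ("freedom", 2), ("vulnerability", 4), ("transformation", 8),
   ("exploration", 16), ("travel", 32), ("relationships", 64), ("nature", 128),
   ("conflict", 256), ("supernatural", 512)]

def categorize_dream_theme_alt (keywords : List String) : List String :=
  let mask : Nat := keywords.foldl (fun m k => m ||| pvKeywordBits.getD (PySem.Str.lower k) 0) 0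
  let result : List String := (pvCategoryMasks.filter (fun p => mask &&& p.2 != 0)).map (·.1)
  if result = [] then ["general"] else result

-- ===== PRECONDITION & SPEC =====
def Spec_categorize_dream_theme (keywords : List String) (out : List String) : Prop := out = categorize_dream_theme_alt keywords
instance (keywords : List String) (out : List String) : Decidable (Spec_categorize_dream_theme keywords out) := by unfold Spec_categorize_dream_theme; infer_instance

-- ===== CLAIM (what is proved, stated in full; the proofs are below) =====
def Claim_equal_categorize_dream_theme : Prop := ∀ (keywords : List String), Dom_categorize_dream_theme keywords → Spec_categorize_dream_theme keywords (categorize_dream_theme keywords)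

-- ===== LEMMAS AND PROOFS =====

-- (keyword, category-index) pairs of A's table, row by row
def pvIdxPairs : List (String × Nat) :=
  pvThemeItems.zipIdx.flatMap (fun q => q.1.2.map (fun kw => (kw, q.2)))

-- Source B's literal bitmask dict is exactly the dict the table's pairs build by OR-ing bit i in place
set_option maxRecDepth 8000 in
theorem pv_bits_eq :
    pvKeywordBits =
      pvIdxPairs.foldl (fun d p => d.modify p.1 0 (fun m => m ||| (1 <<< p.2))) PySem.Dict.empty := by
  decide

-- testing a single bit with '& (1 <<< i)' is testBit
theorem pv_and_pow (m i : Nat) : (m &&& (1 <<< i) != 0) = m.testBit i := by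
  have h : (1 : Nat) <<< i = 2 ^ i := by simp [Nat.shiftLeft_eq]
  rw [h, Nat.and_two_pow]
  cases hb : m.testBit i
  · simp
  · simp

-- a bit of the OR-accumulating fold over the input keywords
theorem pv_testBit_foldl_lor (l : List String) (m0 : Nat) (i : Nat) :
    (l.foldl (fun m k => m ||| pvKeywordBits.getD (PySem.Str.lower k) 0) m0).testBit i
    = (m0.testBit i || l.any fun k => (pvKeywordBits.getD (PySem.Str.lower k) 0).testBit i) := by
  induction l generalizing m0 with
  | nil => simp
  | cons a t ih => simp [List.foldl_cons, ih, Bool.or_assoc]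

-- a bit of a dict built by OR-ing single bits into entries in place
theorem pv_testBit_modify_foldl (l : List (String × Nat)) (d : PySem.Dict String Nat)
    (t : String) (i : Nat) :
    ((l.foldl (fun d p => d.modify p.1 0 (fun m => m ||| (1 <<< p.2))) d).getD t 0).testBit i
    = ((d.getD t 0).testBit i || l.any fun p => p.1 == t && p.2 == i) := by
  induction l generalizing d with
  | nil => simp
  | cons a r ih =>
    rw [List.foldl_cons, ih]
    by_cases h : t = a.1
    · subst h
      rw [PySem.Dict.getD_modify_self, Nat.testBit_lor]
      have h1 : (1 : Nat) <<< a.2 = 2 ^ a.2 := by simp [Nat.shiftLeft_eq]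
      rw [h1, Nat.testBit_two_pow, Bool.or_assoc]
      have h2 : (decide (a.2 = i)) = (a.1 == a.1 && a.2 == i) := by simp [beq_eq_decide]
      rw [h2, List.any_cons]
    · rw [PySem.Dict.getD_modify_of_ne d 0 _ h, List.any_cons]
      have h2 : (a.1 == t) = false := beq_eq_false_iff_ne.mpr (fun he => h he.symm)
      simp [h2]

-- characterisation of a keyword's bitmask through the table's pairs
theorem pv_bit_char (t : String) (i : Nat) :
    (pvKeywordBits.getD t 0).testBit i = pvIdxPairs.any (fun p => p.1 == t && p.2 == i) := by
  rw [pv_bits_eq, pv_testBit_modify_foldl]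
  simp

-- a (keyword, index) pair of pvIdxPairs is a table row hit
theorem pv_mem_pairs (t : String) (i : Nat) :
    (∃ p ∈ pvIdxPairs, p.1 = t ∧ p.2 = i) ↔ ∃ q ∈ pvThemeItems.zipIdx, q.2 = i ∧ t ∈ q.1.2 := by
  simp only [pvIdxPairs, List.mem_flatMap, List.mem_map]
  constructor
  · rintro ⟨p, ⟨q, hq, kw, hkw, rfl⟩, h1, h2⟩
    exact ⟨q, hq, h2, h1 ▸ hkw⟩
  · rintro ⟨q, hq, h1, h2⟩
    exact ⟨(t, q.2), ⟨q, hq, t, h2, rfl⟩, rfl, h1⟩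

-- rows of zipIdx are determined by their index
theorem pv_zipIdx_inj {l : List (String × List String)} {q q' : (String × List String) × Nat}
    (hq : q ∈ l.zipIdx) (hq' : q' ∈ l.zipIdx) (h : q'.2 = q.2) : q' = q := by
  obtain ⟨a, i⟩ := q; obtain ⟨a', i'⟩ := q'
  obtain ⟨-, -, h1⟩ := List.mem_zipIdx hq
  obtain ⟨-, -, h2⟩ := List.mem_zipIdx hq'
  simp only at h; subst h
  simp [h1, h2]

-- per-row equality of B's bit test and A's set scan
theorem pv_cond (keywords : List String) (q : (String × List String) × Nat)
    (hq : q ∈ pvThemeItems.zipIdx) :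
    ((keywords.foldl (fun m k => m ||| pvKeywordBits.getD (PySem.Str.lower k) 0) 0) &&& (1 <<< q.2) != 0)
    = q.1.2.any (fun kw => PySem.Set.contains (PySem.Set.ofList (keywords.map PySem.Str.lower)) kw) := by
  rw [pv_and_pow, pv_testBit_foldl_lor, Bool.eq_iff_iff]
  simp only [Nat.zero_testBit, Bool.false_or, List.any_eq_true, pv_bit_char,
    PySem.Set.contains_iff, PySem.Set.mem_ofList, List.mem_map, beq_iff_eq, Bool.and_eq_true]
  constructor
  · rintro ⟨k, hk, hp⟩
    have hp' : ∃ p ∈ pvIdxPairs, p.1 = PySem.Str.lower k ∧ p.2 = q.2 := by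
      obtain ⟨p, h1, h2⟩ := hp; exact ⟨p, h1, h2⟩
    obtain ⟨q', hq', h1, h2⟩ := (pv_mem_pairs _ _).mp hp'
    have := pv_zipIdx_inj hq hq' h1
    exact ⟨PySem.Str.lower k, this ▸ h2, k, hk, rfl⟩
  · rintro ⟨kw, hkw, k, hk, rfl⟩
    obtain ⟨p, h1, h2, h3⟩ := (pv_mem_pairs (PySem.Str.lower k) q.2).mpr ⟨q, hq, rfl, hkw⟩
    exact ⟨k, hk, p, h1, h2, h3⟩

-- ===== VERDICT (by name: the statement is the Claim_ definition above) =====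
theorem categorize_dream_theme_spec : Claim_equal_categorize_dream_theme := by
  intro keywords _
  unfold Spec_categorize_dream_theme categorize_dream_theme categorize_dream_theme_alt
  have hitems : (PySem.Dict.ofList pvThemeItems : PySem.Dict String (List String)).items = pvThemeItems := by decide
  have hmask : pvCategoryMasks = pvThemeItems.zipIdx.map (fun q => (q.1.1, 1 <<< q.2)) := by decide
  simp only [hitems, hmask]
  rw [PySem.List.foldl_append_if]
  conv_lhs => rw [show pvThemeItems = pvThemeItems.zipIdx.map (·.1) by decide]
  rw [List.filter_map, List.filter_map, List.map_map, List.map_map,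
    List.filter_congr (fun q hq => ?_)]
  · rfl
  · exact (pv_cond keywords q hq).symm
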